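-- pv_equiv track=rewrite | github.com/boldm1/vrp-solver | src/model.py | _extract_tours
-- ===== SOURCE A (Python) =====
-- from typing import List
--
-- def _extract_tours(adj_matrix: List[List[int]]) -> List[List[int]]:
--     """
--     Converts an adjacency matrix representation of a solution into a list of tours.
--
--     For example, an adjacency matrix like:
--         [[0, 1, 0, 0],
--          [1, 0, 0, 0],
--          [0, 0, 0, 1],
--          [0, 0, 1, 0]]
--     is transformed into [[0, 1, 0], [2, 3, 2]].
--
--     Args:
--         adj_matrix: A square adjacency matrix where `adj_matrix[i][j] == 1`
--             if a vehicle travels from location `i` to `j`.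
--
--     Returns:
--         A list of tours, where each tour is a list of location indices
--         representing the path taken (e.g., [depot, loc1, loc2, depot]).
--     """
--     n = len(adj_matrix)
--     if n == 0:
--         return []
--
--     used = set()  # Edges (i, j) that have already been used
--     tours = []
--
--     def next_unused_edge_from(u):
--         for v, val in enumerate(adj_matrix[u]):
--             if val == 1 and (u, v) not in used:
--                 return v
--         return None
--
--     for start in range(n):
--         while True:
--             v0 = None
--             for v, val in enumerate(adj_matrix[start]):
--                 if val == 1 and (start, v) not in used:
--                     v0 = v
--                     break
--             if v0 is None:
--                 break
--             tour = [start]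
--             current = start
--
--             while True:
--                 next_node = next_unused_edge_from(current)
--                 if next_node is None:
--                     break
--                 used.add((current, next_node))
--                 current = next_node
--                 tour.append(current)
--                 if current == start:  # closed cycle
--                     break
--
--             if len(tour) > 1 and tour[0] == tour[-1]:
--                 tours.append(tour)
--
--     return tours
-- ===== SOURCE B (Python) =====
-- from typing import List
--
-- def _extract_tours(adj_matrix: List[List[int]]) -> List[List[int]]:
--     # Per-node monotonic pointer into each row instead of rescanning from 0 each time.
--     n = len(adj_matrix)
--     tours = []
--     ptr = [0] * n
--
--     def take_next(u):
--         # first column >= ptr[u] whose entry is 1; advance the pointer past it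
--         row = adj_matrix[u]
--         m = len(row)
--         i = ptr[u]
--         while i < m and row[i] != 1:
--             i += 1
--         if i < m:
--             ptr[u] = i + 1
--             return i
--         ptr[u] = i
--         return None
--
--     for start in range(n):
--         while True:
--             v = take_next(start)
--             if v is None:
--                 break
--             tour = [start, v]
--             current = v
--             while current != start:
--                 nxt = take_next(current)
--                 if nxt is None:
--                     break
--                 tour.append(nxt)
--                 current = nxt
--             if current == start:
--                 tours.append(tour)
--     return tours
-- ===== Notes on version B (the rewrite author's own statement) =====
-- stated objective: alternative
-- what changed: Replaces the used-edge set and A's repeated from-zero rescans of each row with one monotonic pointer per row that only moves forward.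
import Mathlib
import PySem

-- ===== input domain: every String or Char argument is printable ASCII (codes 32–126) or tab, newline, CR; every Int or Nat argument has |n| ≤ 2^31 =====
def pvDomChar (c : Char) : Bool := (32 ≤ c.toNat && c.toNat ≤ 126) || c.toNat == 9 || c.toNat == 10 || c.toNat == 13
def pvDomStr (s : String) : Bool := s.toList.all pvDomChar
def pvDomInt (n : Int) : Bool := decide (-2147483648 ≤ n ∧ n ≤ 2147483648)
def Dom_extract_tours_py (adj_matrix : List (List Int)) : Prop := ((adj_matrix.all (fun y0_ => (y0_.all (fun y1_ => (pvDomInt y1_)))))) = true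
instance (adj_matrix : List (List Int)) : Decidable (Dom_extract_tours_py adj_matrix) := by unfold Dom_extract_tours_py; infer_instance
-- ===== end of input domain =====

-- B replaces A's used-edge set and repeated from-zero row rescans by one monotonic pointer per row that only moves forward (objective: alternative).

-- ===== PORT A =====
-- total number of 1-entries; used only as a fuel bound for the ports' while-loops
def pvE (adj : List (List Int)) : Nat :=
  ∑ u ∈ Finset.range adj.length, (adj.getD u []).count 1

def pvRow (adj : List (List Int)) (u : Nat) : List Int := adj.getD u []

-- A's `next_unused_edge_from` / inline scan: first v with row[v] == 1 and (u, v) not used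
def pvFindA (used : PySem.Set (Nat × Nat)) (u : Nat) : List Int → Nat → Option Nat
  | [], _ => none
  | a :: rest, v => if a = 1 ∧ (u, v) ∉ used then some v else pvFindA used u rest (v + 1)

-- A's inner `while True` tour loop (fuel ≥ remaining unused edges + 1 always suffices)
def pvTourA (adj : List (List Int)) (start : Nat) :
    Nat → Nat → List Int → PySem.Set (Nat × Nat) → List Int × PySem.Set (Nat × Nat)
  | 0, _, tour, used => (tour, used)
  | fuel + 1, current, tour, used =>
    match pvFindA used current (pvRow adj current) 0 with
    | none => (tour, used)
    | some v =>
      let used' := PySem.Set.add used (current, v)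
      let tour' := tour ++ [(v : Int)]
      if v = start then (tour', used') else pvTourA adj start fuel v tour' used'

-- A's outer `while True` loop for a fixed start
def pvOuterA (adj : List (List Int)) (start : Nat) :
    Nat → List (List Int) → PySem.Set (Nat × Nat) → List (List Int) × PySem.Set (Nat × Nat)
  | 0, tours, used => (tours, used)
  | fuel + 1, tours, used =>
    match pvFindA used start (pvRow adj start) 0 with
    | none => (tours, used)
    | some _ =>
      let res := pvTourA adj start (pvE adj + 1) start [(start : Int)] used
      let tours' := if 1 < res.1.length ∧ res.1.head? = res.1.getLast? then tours ++ [res.1]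
                    else tours
      pvOuterA adj start fuel tours' res.2

def extract_tours_py (adj_matrix : List (List Int)) : List (List Int) :=
  if adj_matrix.length = 0 then []
  else
    ((List.range adj_matrix.length).foldl
      (fun st start => pvOuterA adj_matrix start (pvE adj_matrix + 1) st.1 st.2)
      ([], PySem.Set.empty)).1

-- ===== PORT B =====
-- B's `while i < m and row[i] != 1: i += 1`
def pvScanB (row : List Int) (i : Nat) : Nat :=
  if h : i < row.length then (if row[i] = 1 then i else pvScanB row (i + 1)) else i
  termination_by row.length - i

-- B's take_next: scan from the row's pointer, advance it past the hit
def pvTakeB (adj : List (List Int)) (ptr : List Nat) (u : Nat) : Option Nat × List Nat :=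
  let row := adj.getD u []
  let i := pvScanB row (ptr.getD u 0)
  if i < row.length then (some i, ptr.set u (i + 1)) else (none, ptr.set u i)

-- B's inner `while current != start` loop
def pvTourB (adj : List (List Int)) (start : Nat) :
    Nat → Nat → List Int → List Nat → List Int × Nat × List Nat
  | 0, current, tour, ptr => (tour, current, ptr)
  | fuel + 1, current, tour, ptr =>
    if current = start then (tour, current, ptr)
    else
      match pvTakeB adj ptr current with
      | (none, ptr') => (tour, current, ptr')
      | (some i, ptr') => pvTourB adj start fuel i (tour ++ [(i : Int)]) ptr'

-- B's outer `while True` loop for a fixed start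
def pvOuterB (adj : List (List Int)) (start : Nat) :
    Nat → List (List Int) → List Nat → List (List Int) × List Nat
  | 0, tours, ptr => (tours, ptr)
  | fuel + 1, tours, ptr =>
    match pvTakeB adj ptr start with
    | (none, ptr') => (tours, ptr')
    | (some v, ptr1) =>
      let res := pvTourB adj start (pvE adj + 1) v [(start : Int), (v : Int)] ptr1
      pvOuterB adj start fuel (if res.2.1 = start then tours ++ [res.1] else tours) res.2.2

def extract_tours_py_alt (adj_matrix : List (List Int)) : List (List Int) :=
  ((List.range adj_matrix.length).foldl
    (fun st start => pvOuterB adj_matrix start (pvE adj_matrix + 1) st.1 st.2)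
    ([], List.replicate adj_matrix.length 0)).1

-- ===== PRECONDITION & SPEC =====
-- Pre_ excludes exactly the matrices with a 1-entry in a column ≥ len(adj_matrix): there the
-- tour-following reaches that column as a node and both A and B raise IndexError on adj_matrix[node].
def Pre_extract_tours_py (adj_matrix : List (List Int)) : Prop :=
  ∀ u, u < adj_matrix.length → ∀ v, v < (adj_matrix.getD u []).length →
    (adj_matrix.getD u []).getD v 0 = 1 → v < adj_matrix.length
instance (adj_matrix : List (List Int)) : Decidable (Pre_extract_tours_py adj_matrix) := by
  unfold Pre_extract_tours_py; infer_instance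
def pvWitness_extract_tours_py : List (List Int) := [[0, 1, 0, 0], [1, 0, 0, 0], [0, 0, 0, 1], [0, 0, 1, 0]]

def Spec_extract_tours_py (adj_matrix : List (List Int)) (out : List (List Int)) : Prop := out = extract_tours_py_alt adj_matrix
instance (adj_matrix : List (List Int)) (out : List (List Int)) : Decidable (Spec_extract_tours_py adj_matrix out) := by unfold Spec_extract_tours_py; infer_instance

-- ===== CLAIM (what is proved, stated in full; the proofs are below) =====
def Claim_equal_extract_tours_py : Prop := ∀ (adj_matrix : List (List Int)), Dom_extract_tours_py adj_matrix → Pre_extract_tours_py adj_matrix → Spec_extract_tours_py adj_matrix (extract_tours_py adj_matrix)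

-- ===== LEMMAS AND PROOFS =====

-- number of 1-entries of row strictly below column k
def pvOnesBelow (row : List Int) (k : Nat) : Nat := (row.take k).count 1

-- 1-entries already consumed, read off B's pointers
def pvConsumed (adj : List (List Int)) (ptr : List Nat) : Nat :=
  ∑ u ∈ Finset.range adj.length, pvOnesBelow (adj.getD u []) (ptr.getD u 0)

def pvRem (adj : List (List Int)) (ptr : List Nat) : Nat := pvE adj - pvConsumed adj ptr

-- simulation invariant: A's used set is exactly the 1-entries below B's pointers
def pvInv (adj : List (List Int)) (used : PySem.Set (Nat × Nat)) (ptr : List Nat) : Prop :=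
  ptr.length = adj.length ∧
  (∀ u, u < adj.length → ptr.getD u 0 ≤ (pvRow adj u).length) ∧
  (∀ u v : Nat, ((u, v) ∈ used ↔ u < adj.length ∧ v < ptr.getD u 0 ∧ (pvRow adj u).getD v 0 = 1))

lemma pvScanB_ge (row : List Int) (i : Nat) : i ≤ pvScanB row i := by
  fun_induction pvScanB row i with
  | case1 => omega
  | case2 i h h1 ih => omega
  | case3 => omega

lemma pvScanB_le (row : List Int) (i : Nat) (h : i ≤ row.length) : pvScanB row i ≤ row.length := by
  fun_induction pvScanB row i with
  | case1 i h h1 => omega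
  | case2 i h h1 ih => exact ih (by omega)
  | case3 => omega

lemma pvScanB_no_one (row : List Int) (i j : Nat) (h1 : i ≤ j) (h2 : j < pvScanB row i) :
    row.getD j 0 ≠ 1 := by
  fun_induction pvScanB row i with
  | case1 i h heq => omega
  | case2 i h hne ih =>
    rcases Nat.eq_or_lt_of_le h1 with rfl | hlt
    · simpa [List.getD_eq_getElem?_getD, List.getElem?_eq_getElem h] using hne
    · exact ih hlt h2
  | case3 i h => omega

lemma pvScanB_hit (row : List Int) (i : Nat) (h : pvScanB row i < row.length) :
    row.getD (pvScanB row i) 0 = 1 := by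
  fun_induction pvScanB row i with
  | case1 i h heq => simpa [List.getD_eq_getElem?_getD, List.getElem?_eq_getElem h] using heq
  | case2 i hh hne ih => exact ih h
  | case3 i hh => omega

lemma pvOnesBelow_succ (row : List Int) (j : Nat) (h : j < row.length) :
    pvOnesBelow row (j + 1) = pvOnesBelow row j + (if row.getD j 0 = 1 then 1 else 0) := by
  unfold pvOnesBelow
  rw [List.take_add_one, List.count_append]
  simp [List.getElem?_eq_getElem h, List.getD_eq_getElem?_getD, List.count_singleton]

lemma pvOnesBelow_stable (row : List Int) (k j : Nat) (hk : k ≤ j) (hj : j ≤ row.length)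
    (hno : ∀ t, k ≤ t → t < j → row.getD t 0 ≠ 1) : pvOnesBelow row j = pvOnesBelow row k := by
  induction j with
  | zero => have : k = 0 := by omega
            simp [this]
  | succ m ih =>
    rcases Nat.eq_or_lt_of_le hk with rfl | hlt
    · rfl
    · have hm : k ≤ m := by omega
      rw [pvOnesBelow_succ row m (by omega), if_neg (hno m hm (by omega)), ih hm (by omega)
        (fun t ht1 ht2 => hno t ht1 (by omega))]
      omega

lemma pvOnesBelow_le_count (row : List Int) (k : Nat) : pvOnesBelow row k ≤ row.count 1 :=
  (List.take_sublist k row).count_le 1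

lemma pvConsumed_le (adj : List (List Int)) (ptr : List Nat) : pvConsumed adj ptr ≤ pvE adj :=
  Finset.sum_le_sum (fun _u _ => pvOnesBelow_le_count _ _)

lemma pvGetD_set_self (l : List Nat) (u x : Nat) (h : u < l.length) :
    (l.set u x).getD u 0 = x := by
  simp [List.getD_eq_getElem?_getD, h]

lemma pvGetD_set_ne (l : List Nat) (u v x : Nat) (h : v ≠ u) :
    (l.set u x).getD v 0 = l.getD v 0 := by
  simp [List.getD_eq_getElem?_getD, List.getElem?_set_ne (by omega : u ≠ v)]

lemma pvConsumed_set (adj : List (List Int)) (ptr : List Nat) (u x : Nat)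
    (hu : u < adj.length) (hlen : ptr.length = adj.length) :
    pvConsumed adj (ptr.set u x) + pvOnesBelow (pvRow adj u) (ptr.getD u 0)
      = pvConsumed adj ptr + pvOnesBelow (pvRow adj u) x := by
  unfold pvConsumed
  have hmem : u ∈ Finset.range adj.length := Finset.mem_range.mpr hu
  rw [← Finset.sum_erase_add _ _ hmem, ← Finset.sum_erase_add _ _ hmem]
  have heq : ∀ v ∈ (Finset.range adj.length).erase u,
      pvOnesBelow (adj.getD v []) ((ptr.set u x).getD v 0) = pvOnesBelow (adj.getD v []) (ptr.getD v 0) := by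
    intro v hv
    rw [pvGetD_set_ne _ _ _ _ (Finset.ne_of_mem_erase hv)]
  rw [Finset.sum_congr rfl heq, pvGetD_set_self _ _ _ (by omega)]
  unfold pvRow; omega

-- A's scan equals B's pointer scan under the invariant
lemma pvFindA_from (used : PySem.Set (Nat × Nat)) (u : Nat) (row : List Int) :
    ∀ k, (∀ v, k ≤ v → (u, v) ∉ used) →
      pvFindA used u (row.drop k) k
        = if pvScanB row k < row.length then some (pvScanB row k) else none := by
  intro k
  induction hn : row.length - k generalizing k with
  | zero =>
    intro hni
    have hk : row.length ≤ k := by omega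
    rw [List.drop_eq_nil_of_le hk, pvScanB]
    simp [Nat.not_lt.mpr hk, pvFindA]
  | succ m ih =>
    intro hni
    have hk : k < row.length := by omega
    rw [List.drop_eq_getElem_cons hk, pvScanB, dif_pos hk]
    by_cases h1 : row[k] = 1
    · rw [if_pos h1]
      simp only [pvFindA]
      rw [if_pos (show row[k] = 1 ∧ (u, k) ∉ used from ⟨h1, hni k le_rfl⟩), if_pos hk]
    · rw [if_neg h1]
      simp only [pvFindA]
      rw [if_neg (show ¬(row[k] = 1 ∧ (u, k) ∉ used) from by tauto)]
      exact ih (k + 1) (by omega) (fun v hv => hni v (by omega))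

lemma pvFindA_skip (used : PySem.Set (Nat × Nat)) (u : Nat) (row : List Int) (p : Nat)
    (hp : p ≤ row.length)
    (hmem : ∀ v, v < p → ((u, v) ∈ used ↔ row.getD v 0 = 1)) :
    ∀ k, k ≤ p → pvFindA used u (row.drop k) k = pvFindA used u (row.drop p) p := by
  intro k
  induction hn : p - k generalizing k with
  | zero => intro hkp; have : k = p := by omega
            subst this; rfl
  | succ m ih =>
    intro hkp
    have hk : k < row.length := by omega
    rw [List.drop_eq_getElem_cons hk]
    have hget : row.getD k 0 = row[k] := by
      simp [List.getD_eq_getElem?_getD, List.getElem?_eq_getElem hk]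
    have hcond : ¬ (row[k] = 1 ∧ (u, k) ∉ used) := by
      intro ⟨h1, h2⟩
      exact h2 (((hmem k (by omega)).mpr) (by rw [hget]; exact h1))
    simp only [pvFindA, if_neg hcond]
    exact ih (k + 1) (by omega) (by omega)

lemma pvFindA_eq (adj : List (List Int)) (used : PySem.Set (Nat × Nat)) (ptr : List Nat)
    (u : Nat) (hInv : pvInv adj used ptr) (hu : u < adj.length) :
    pvFindA used u (pvRow adj u) 0
      = if pvScanB (pvRow adj u) (ptr.getD u 0) < (pvRow adj u).length
        then some (pvScanB (pvRow adj u) (ptr.getD u 0)) else none := by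
  obtain ⟨hlen, hbound, hmem⟩ := hInv
  have hp : ptr.getD u 0 ≤ (pvRow adj u).length := hbound u hu
  have h1 := pvFindA_skip used u (pvRow adj u) (ptr.getD u 0) hp
    (fun v hv => by
      rw [hmem u v]
      exact ⟨fun ⟨_, _, h⟩ => h, fun h => ⟨hu, hv, h⟩⟩) 0 (Nat.zero_le _)
  have h2 := pvFindA_from used u (pvRow adj u) (ptr.getD u 0)
    (fun v hv hin => by have := ((hmem u v).mp hin).2.1; omega)
  simpa using h1.trans h2

-- taking the found edge preserves the invariant and consumes exactly one edge
lemma pvStep_some (adj : List (List Int)) (used : PySem.Set (Nat × Nat)) (ptr : List Nat)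
    (u : Nat) (hInv : pvInv adj used ptr) (hu : u < adj.length)
    (hi : pvScanB (pvRow adj u) (ptr.getD u 0) < (pvRow adj u).length) :
    pvInv adj (PySem.Set.add used (u, pvScanB (pvRow adj u) (ptr.getD u 0)))
      (ptr.set u (pvScanB (pvRow adj u) (ptr.getD u 0) + 1)) ∧
    pvConsumed adj (ptr.set u (pvScanB (pvRow adj u) (ptr.getD u 0) + 1)) = pvConsumed adj ptr + 1 := by
  obtain ⟨hlen, hbound, hmem⟩ := hInv
  have hp : ptr.getD u 0 ≤ (pvRow adj u).length := hbound u hu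
  have hpi : ptr.getD u 0 ≤ pvScanB (pvRow adj u) (ptr.getD u 0) := pvScanB_ge _ _
  have hhit : (pvRow adj u).getD (pvScanB (pvRow adj u) (ptr.getD u 0)) 0 = 1 := pvScanB_hit _ _ hi
  have hno := pvScanB_no_one (pvRow adj u) (ptr.getD u 0)
  have hulen : u < ptr.length := by omega
  refine ⟨⟨by simpa using hlen, ?_, ?_⟩, ?_⟩
  · intro u' hu'
    by_cases h : u' = u
    · subst h; rw [pvGetD_set_self _ _ _ hulen]; omega
    · rw [pvGetD_set_ne _ _ _ _ h]; exact hbound u' hu'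
  · intro u' v
    rw [PySem.Set.mem_add, hmem u' v, Prod.mk.injEq]
    by_cases h : u' = u
    · subst h
      rw [pvGetD_set_self _ _ _ hulen]
      constructor
      · rintro (⟨h1, h2, h3⟩ | ⟨-, rfl⟩)
        · exact ⟨h1, by omega, h3⟩
        · exact ⟨hu, by omega, hhit⟩
      · rintro ⟨h1, h2, h3⟩
        by_cases hv : v = pvScanB (pvRow adj u') (ptr.getD u' 0)
        · exact Or.inr ⟨rfl, hv⟩
        · left
          refine ⟨h1, ?_, h3⟩
          by_contra hge
          exact hno v (by omega) (by omega) h3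
    · rw [pvGetD_set_ne _ _ _ _ h]
      constructor
      · rintro (h1 | ⟨rfl, -⟩)
        · exact h1
        · exact absurd rfl h
      · exact Or.inl
  · have hcs := pvConsumed_set adj ptr u (pvScanB (pvRow adj u) (ptr.getD u 0) + 1) hu hlen
    have hsucc := pvOnesBelow_succ (pvRow adj u) (pvScanB (pvRow adj u) (ptr.getD u 0)) hi
    rw [if_pos hhit] at hsucc
    have hstab := pvOnesBelow_stable (pvRow adj u) (ptr.getD u 0)
      (pvScanB (pvRow adj u) (ptr.getD u 0)) hpi (le_of_lt hi)
      (fun t ht1 ht2 => hno t ht1 ht2)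
    omega

lemma pvStep_none (adj : List (List Int)) (used : PySem.Set (Nat × Nat)) (ptr : List Nat)
    (u : Nat) (hInv : pvInv adj used ptr) (hu : u < adj.length)
    (hi : ¬ pvScanB (pvRow adj u) (ptr.getD u 0) < (pvRow adj u).length) :
    pvInv adj used (ptr.set u (pvScanB (pvRow adj u) (ptr.getD u 0))) ∧
    pvConsumed adj (ptr.set u (pvScanB (pvRow adj u) (ptr.getD u 0))) = pvConsumed adj ptr := by
  obtain ⟨hlen, hbound, hmem⟩ := hInv
  have hp : ptr.getD u 0 ≤ (pvRow adj u).length := hbound u hu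
  have hpi : ptr.getD u 0 ≤ pvScanB (pvRow adj u) (ptr.getD u 0) := pvScanB_ge _ _
  have hle : pvScanB (pvRow adj u) (ptr.getD u 0) ≤ (pvRow adj u).length := pvScanB_le _ _ hp
  have hno := pvScanB_no_one (pvRow adj u) (ptr.getD u 0)
  have hulen : u < ptr.length := by omega
  refine ⟨⟨by simpa using hlen, ?_, ?_⟩, ?_⟩
  · intro u' hu'
    by_cases h : u' = u
    · subst h; rw [pvGetD_set_self _ _ _ hulen]; exact hle
    · rw [pvGetD_set_ne _ _ _ _ h]; exact hbound u' hu'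
  · intro u' v
    rw [hmem u' v]
    by_cases h : u' = u
    · subst h
      rw [pvGetD_set_self _ _ _ hulen]
      constructor
      · rintro ⟨h1, h2, h3⟩; exact ⟨h1, by omega, h3⟩
      · rintro ⟨h1, h2, h3⟩
        refine ⟨h1, ?_, h3⟩
        by_contra hge
        exact hno v (by omega) (by omega) h3
    · rw [pvGetD_set_ne _ _ _ _ h]
  · have hcs := pvConsumed_set adj ptr u (pvScanB (pvRow adj u) (ptr.getD u 0)) hu hlen
    have hstab := pvOnesBelow_stable (pvRow adj u) (ptr.getD u 0)
      (pvScanB (pvRow adj u) (ptr.getD u 0)) hpi hle (fun t ht1 ht2 => hno t ht1 ht2)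
    omega

lemma pvRow_eq (adj : List (List Int)) (u : Nat) : adj.getD u [] = pvRow adj u := rfl

lemma pvHead?_concat (l : List Int) (x a : Int) (h : l.head? = some a) :
    (l ++ [x]).head? = some a := by
  cases l with
  | nil => simp at h
  | cons y ys => simpa using h

-- lockstep simulation of the two tour loops
lemma pvTour_eq (adj : List (List Int)) (hPre : Pre_extract_tours_py adj) (start : Nat)
    (hstart : start < adj.length) :
    ∀ fuelA fuelB current tour used ptr, pvInv adj used ptr → current < adj.length →
      current ≠ start → pvRem adj ptr < fuelA → pvRem adj ptr < fuelB →
      tour.head? = some (start : Int) → tour.getLast? = some (current : Int) → 1 < tour.length →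
      ∃ tour' cur' used' ptr',
        pvTourA adj start fuelA current tour used = (tour', used') ∧
        pvTourB adj start fuelB current tour ptr = (tour', cur', ptr') ∧
        pvInv adj used' ptr' ∧ cur' < adj.length ∧ pvRem adj ptr' ≤ pvRem adj ptr ∧
        tour'.head? = some (start : Int) ∧ tour'.getLast? = some (cur' : Int) ∧ 1 < tour'.length := by
  intro fuelA
  induction fuelA with
  | zero => intro fuelB current tour used ptr hInv hcur hne hfa hfb hh hl hlen; omega
  | succ fa ih =>
    intro fuelB current tour used ptr hInv hcur hne hfa hfb hh hl hlen
    obtain ⟨fb, rfl⟩ : ∃ fb, fuelB = fb + 1 := ⟨fuelB - 1, by omega⟩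
    have hfind := pvFindA_eq adj used ptr current hInv hcur
    have htne : tour ≠ [] := by intro h; rw [h] at hlen; simp at hlen
    by_cases hilt : pvScanB (pvRow adj current) (ptr.getD current 0) < (pvRow adj current).length
    · rw [if_pos hilt] at hfind
      obtain ⟨hInv1, hcons1⟩ := pvStep_some adj used ptr current hInv hcur hilt
      have hE1 := pvConsumed_le adj (ptr.set current (pvScanB (pvRow adj current) (ptr.getD current 0) + 1))
      have hrem1 : pvRem adj (ptr.set current (pvScanB (pvRow adj current) (ptr.getD current 0) + 1)) + 1
          = pvRem adj ptr := by unfold pvRem; omega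
      have hilt' : pvScanB (pvRow adj current) (ptr.getD current 0) < adj.length := by
        apply hPre current hcur _ hilt
        exact pvScanB_hit _ _ hilt
      have hB : pvTourB adj start (fb + 1) current tour ptr
          = pvTourB adj start fb (pvScanB (pvRow adj current) (ptr.getD current 0))
              (tour ++ [((pvScanB (pvRow adj current) (ptr.getD current 0)) : Int)])
              (ptr.set current (pvScanB (pvRow adj current) (ptr.getD current 0) + 1)) := by
        simp only [pvTourB, if_neg hne, pvTakeB, pvRow_eq]
        rw [if_pos hilt]
      by_cases histart : pvScanB (pvRow adj current) (ptr.getD current 0) = start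
      · -- tour closes
        have hA : pvTourA adj start (fa + 1) current tour used
            = (tour ++ [((pvScanB (pvRow adj current) (ptr.getD current 0)) : Int)],
               PySem.Set.add used (current, pvScanB (pvRow adj current) (ptr.getD current 0))) := by
          simp only [pvTourA, hfind, if_pos histart]
        obtain ⟨fb', rfl⟩ : ∃ fb', fb = fb' + 1 := ⟨fb - 1, by omega⟩
        refine ⟨_, start, _, _, hA, ?_, hInv1, hstart, by omega, pvHead?_concat _ _ _ hh, ?_, ?_⟩
        · rw [hB, histart]
          simp [pvTourB]
        · rw [histart, List.getLast?_concat]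
        · simp; omega
      · -- tour continues
        have hA : pvTourA adj start (fa + 1) current tour used
            = pvTourA adj start fa (pvScanB (pvRow adj current) (ptr.getD current 0))
                (tour ++ [((pvScanB (pvRow adj current) (ptr.getD current 0)) : Int)])
                (PySem.Set.add used (current, pvScanB (pvRow adj current) (ptr.getD current 0))) := by
          simp only [pvTourA, hfind, if_neg histart]
        obtain ⟨tour', cur', used', ptr', hA', hB', hI', hc', hr', hh', hl', hln'⟩ :=
          ih fb (pvScanB (pvRow adj current) (ptr.getD current 0))
            (tour ++ [((pvScanB (pvRow adj current) (ptr.getD current 0)) : Int)])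
            (PySem.Set.add used (current, pvScanB (pvRow adj current) (ptr.getD current 0)))
            (ptr.set current (pvScanB (pvRow adj current) (ptr.getD current 0) + 1))
            hInv1 hilt' histart (by omega) (by omega)
            (pvHead?_concat _ _ _ hh) (List.getLast?_concat) (by simp; omega)
        exact ⟨tour', cur', used', ptr', by rw [hA]; exact hA', by rw [hB]; exact hB',
          hI', hc', by omega, hh', hl', hln'⟩
    · rw [if_neg hilt] at hfind
      obtain ⟨hInv1, hcons1⟩ := pvStep_none adj used ptr current hInv hcur hilt
      have hA : pvTourA adj start (fa + 1) current tour used = (tour, used) := by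
        simp only [pvTourA, hfind]
      have hB : pvTourB adj start (fb + 1) current tour ptr
          = (tour, current, ptr.set current (pvScanB (pvRow adj current) (ptr.getD current 0))) := by
        simp only [pvTourB, if_neg hne, pvTakeB, pvRow_eq]
        rw [if_neg hilt]
      exact ⟨tour, current, used, _, hA, hB, hInv1, hcur, by unfold pvRem; omega, hh, hl, hlen⟩

-- lockstep simulation of the two outer loops
lemma pvOuter_eq (adj : List (List Int)) (hPre : Pre_extract_tours_py adj) (start : Nat)
    (hstart : start < adj.length) :
    ∀ fuelA fuelB tours used ptr, pvInv adj used ptr →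
      pvRem adj ptr < fuelA → pvRem adj ptr < fuelB →
      ∃ tours' used' ptr',
        pvOuterA adj start fuelA tours used = (tours', used') ∧
        pvOuterB adj start fuelB tours ptr = (tours', ptr') ∧
        pvInv adj used' ptr' ∧ pvRem adj ptr' ≤ pvRem adj ptr := by
  intro fuelA
  induction fuelA with
  | zero => intro fuelB tours used ptr hInv hfa hfb; omega
  | succ fa ih =>
    intro fuelB tours used ptr hInv hfa hfb
    obtain ⟨fb, rfl⟩ : ∃ fb, fuelB = fb + 1 := ⟨fuelB - 1, by omega⟩
    have hfind := pvFindA_eq adj used ptr start hInv hstart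
    by_cases hilt : pvScanB (pvRow adj start) (ptr.getD start 0) < (pvRow adj start).length
    · rw [if_pos hilt] at hfind
      obtain ⟨hInv1, hcons1⟩ := pvStep_some adj used ptr start hInv hstart hilt
      have hE1 := pvConsumed_le adj (ptr.set start (pvScanB (pvRow adj start) (ptr.getD start 0) + 1))
      have hrem1 : pvRem adj (ptr.set start (pvScanB (pvRow adj start) (ptr.getD start 0) + 1)) + 1
          = pvRem adj ptr := by unfold pvRem; omega
      have hremE : pvRem adj ptr ≤ pvE adj := by unfold pvRem; omega
      have hiltn : pvScanB (pvRow adj start) (ptr.getD start 0) < adj.length :=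
        hPre start hstart _ hilt (pvScanB_hit _ _ hilt)
      have hB0 : pvOuterB adj start (fb + 1) tours ptr
          = pvOuterB adj start fb
              (if (pvTourB adj start (pvE adj + 1) (pvScanB (pvRow adj start) (ptr.getD start 0))
                    [(start : Int), ((pvScanB (pvRow adj start) (ptr.getD start 0)) : Int)]
                    (ptr.set start (pvScanB (pvRow adj start) (ptr.getD start 0) + 1))).2.1 = start
               then tours ++ [(pvTourB adj start (pvE adj + 1) (pvScanB (pvRow adj start) (ptr.getD start 0))
                    [(start : Int), ((pvScanB (pvRow adj start) (ptr.getD start 0)) : Int)]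
                    (ptr.set start (pvScanB (pvRow adj start) (ptr.getD start 0) + 1))).1]
               else tours)
              (pvTourB adj start (pvE adj + 1) (pvScanB (pvRow adj start) (ptr.getD start 0))
                    [(start : Int), ((pvScanB (pvRow adj start) (ptr.getD start 0)) : Int)]
                    (ptr.set start (pvScanB (pvRow adj start) (ptr.getD start 0) + 1))).2.2 := by
        simp only [pvOuterB, pvTakeB, pvRow_eq]
        rw [if_pos hilt]
      have hA0 : pvOuterA adj start (fa + 1) tours used
          = pvOuterA adj start fa
              (if 1 < (pvTourA adj start (pvE adj + 1) start [(start : Int)] used).1.length ∧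
                  (pvTourA adj start (pvE adj + 1) start [(start : Int)] used).1.head?
                    = (pvTourA adj start (pvE adj + 1) start [(start : Int)] used).1.getLast?
               then tours ++ [(pvTourA adj start (pvE adj + 1) start [(start : Int)] used).1]
               else tours)
              (pvTourA adj start (pvE adj + 1) start [(start : Int)] used).2 := by
        simp only [pvOuterA, hfind]
      have hA1 : pvTourA adj start (pvE adj + 1) start [(start : Int)] used
          = (if pvScanB (pvRow adj start) (ptr.getD start 0) = start
             then ([(start : Int), ((pvScanB (pvRow adj start) (ptr.getD start 0)) : Int)],
                   PySem.Set.add used (start, pvScanB (pvRow adj start) (ptr.getD start 0)))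
             else pvTourA adj start (pvE adj) (pvScanB (pvRow adj start) (ptr.getD start 0))
                    [(start : Int), ((pvScanB (pvRow adj start) (ptr.getD start 0)) : Int)]
                    (PySem.Set.add used (start, pvScanB (pvRow adj start) (ptr.getD start 0)))) := by
        simp only [pvTourA, hfind]
        split <;> simp
      by_cases histart : pvScanB (pvRow adj start) (ptr.getD start 0) = start
      · rw [if_pos histart] at hA1
        have hBt : pvTourB adj start (pvE adj + 1) (pvScanB (pvRow adj start) (ptr.getD start 0))
            [(start : Int), ((pvScanB (pvRow adj start) (ptr.getD start 0)) : Int)]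
            (ptr.set start (pvScanB (pvRow adj start) (ptr.getD start 0) + 1))
            = ([(start : Int), ((pvScanB (pvRow adj start) (ptr.getD start 0)) : Int)],
               start, ptr.set start (pvScanB (pvRow adj start) (ptr.getD start 0) + 1)) := by
          rw [histart]
          simp [pvTourB]
        rw [hBt] at hB0
        rw [hA1] at hA0
        simp only at hA0 hB0
        have hcA : 1 < ([(start : Int), ((pvScanB (pvRow adj start) (ptr.getD start 0)) : Int)] : List Int).length ∧
            ([(start : Int), ((pvScanB (pvRow adj start) (ptr.getD start 0)) : Int)] : List Int).head?
              = ([(start : Int), ((pvScanB (pvRow adj start) (ptr.getD start 0)) : Int)] : List Int).getLast? := by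
          refine ⟨by simp, ?_⟩
          rw [histart]
          simp
        rw [if_pos hcA] at hA0
        rw [if_true] at hB0
        obtain ⟨tours', used', ptr', hA', hB', hI', hr'⟩ :=
          ih fb (tours ++ [[(start : Int), ((pvScanB (pvRow adj start) (ptr.getD start 0)) : Int)]])
            (PySem.Set.add used (start, pvScanB (pvRow adj start) (ptr.getD start 0)))
            (ptr.set start (pvScanB (pvRow adj start) (ptr.getD start 0) + 1))
            hInv1 (by omega) (by omega)
        exact ⟨tours', used', ptr', by rw [hA0]; exact hA', by rw [hB0]; exact hB', hI', by omega⟩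
      · rw [if_neg histart] at hA1
        obtain ⟨tour', cur', used', ptr2, hA', hB', hI', hc', hr', hh', hl', hln'⟩ :=
          pvTour_eq adj hPre start hstart (pvE adj) (pvE adj + 1)
            (pvScanB (pvRow adj start) (ptr.getD start 0))
            [(start : Int), ((pvScanB (pvRow adj start) (ptr.getD start 0)) : Int)]
            (PySem.Set.add used (start, pvScanB (pvRow adj start) (ptr.getD start 0)))
            (ptr.set start (pvScanB (pvRow adj start) (ptr.getD start 0) + 1))
            hInv1 hiltn histart (by omega) (by omega) (by simp) (by simp) (by simp)
        have hcond : (1 < tour'.length ∧ tour'.head? = tour'.getLast?) ↔ cur' = start := by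
          rw [hh', hl']
          constructor
          · rintro ⟨-, h⟩
            exact_mod_cast (Option.some_inj.mp h).symm
          · rintro rfl
            exact ⟨hln', rfl⟩
        have htours : (if 1 < tour'.length ∧ tour'.head? = tour'.getLast?
              then tours ++ [tour'] else tours) = (if cur' = start then tours ++ [tour'] else tours) := by
          by_cases hc : cur' = start
          · rw [if_pos (hcond.mpr hc), if_pos hc]
          · rw [if_neg (fun hx => hc (hcond.mp hx)), if_neg hc]
        obtain ⟨tours', usedf, ptrf, hA2, hB2, hI2, hr2⟩ :=
          ih fb (if cur' = start then tours ++ [tour'] else tours) used' ptr2 hI'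
            (by omega) (by omega)
        refine ⟨tours', usedf, ptrf, ?_, ?_, hI2, by omega⟩
        · rw [hA0, hA1, hA', htours]
          exact hA2
        · rw [hB0, hB']
          exact hB2
    · rw [if_neg hilt] at hfind
      obtain ⟨hInv1, hcons1⟩ := pvStep_none adj used ptr start hInv hstart hilt
      have hA : pvOuterA adj start (fa + 1) tours used = (tours, used) := by
        simp only [pvOuterA, hfind]
      have hB : pvOuterB adj start (fb + 1) tours ptr
          = (tours, ptr.set start (pvScanB (pvRow adj start) (ptr.getD start 0))) := by
        simp only [pvOuterB, pvTakeB, pvRow_eq]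
        rw [if_neg hilt]
      exact ⟨tours, used, _, hA, hB, hInv1, by unfold pvRem; omega⟩

lemma pvFold_eq (adj : List (List Int)) (hPre : Pre_extract_tours_py adj) :
    ∀ l : List Nat, (∀ s ∈ l, s < adj.length) → ∀ tours used ptr, pvInv adj used ptr →
      ∃ tours' used' ptr',
        l.foldl (fun st start => pvOuterA adj start (pvE adj + 1) st.1 st.2) (tours, used) = (tours', used') ∧
        l.foldl (fun st start => pvOuterB adj start (pvE adj + 1) st.1 st.2) (tours, ptr) = (tours', ptr') ∧
        pvInv adj used' ptr' := by
  intro l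
  induction l with
  | nil => intro _ tours used ptr hInv; exact ⟨tours, used, ptr, rfl, rfl, hInv⟩
  | cons sN rest ih =>
    intro hmem tours used ptr hInv
    have hs : sN < adj.length := hmem sN (by simp)
    have hrem : pvRem adj ptr < pvE adj + 1 := by
      have := pvConsumed_le adj ptr
      unfold pvRem; omega
    obtain ⟨tours1, used1, ptr1, hA1, hB1, hI1, -⟩ :=
      pvOuter_eq adj hPre sN hs (pvE adj + 1) (pvE adj + 1) tours used ptr hInv hrem hrem
    obtain ⟨tours', used', ptr', hA2, hB2, hI2⟩ :=
      ih (fun x hx => hmem x (by simp [hx])) tours1 used1 ptr1 hI1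
    refine ⟨tours', used', ptr', ?_, ?_, hI2⟩
    · simp only [List.foldl_cons]
      rw [hA1]
      exact hA2
    · simp only [List.foldl_cons]
      rw [hB1]
      exact hB2

lemma pvInv_init (adj : List (List Int)) :
    pvInv adj PySem.Set.empty (List.replicate adj.length 0) := by
  have hget : ∀ u : Nat, (List.replicate adj.length (0 : Nat)).getD u 0 = 0 := by
    intro u
    simp [List.getD_eq_getElem?_getD, List.getElem?_replicate]
    split <;> rfl
  refine ⟨by simp, ?_, ?_⟩
  · intro u hu
    rw [hget]
    exact Nat.zero_le _
  · intro u v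
    rw [hget]
    simp [PySem.Set.empty]

-- ===== VERDICT (by name: the statement is the Claim_ definition above) =====
theorem extract_tours_py_spec : Claim_equal_extract_tours_py := by
  intro adj _hDom hPre
  unfold Spec_extract_tours_py extract_tours_py extract_tours_py_alt
  by_cases hn : adj.length = 0
  · simp [hn]
  · obtain ⟨tours', used', ptr', hA, hB, _⟩ :=
      pvFold_eq adj hPre (List.range adj.length) (fun s hs => List.mem_range.mp hs)
        [] PySem.Set.empty (List.replicate adj.length 0) (pvInv_init adj)
    rw [if_neg hn, hA, hB]
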